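-- pv_equiv track=rewrite | github.com/AkhilVinayakp/py_learning | prb_slv/queue/prob4.py | max_min_product
-- ===== SOURCE A (Python) =====
-- from typing import List
--
-- def find_sub_arrays(arr:List)->List:
-- 	ll = []
-- 	for i in range(len(arr)):
-- 		r = i+1
-- 		while r <= len(arr):
-- 			sub = arr[i:r]
-- 			ll.append(sub)
-- 			r = r+1
-- 	return ll
--
-- def max_min_product(arr:List)->int:
-- 	sub_arr = find_sub_arrays(arr)
-- 	max_ = 0
-- 	ret = {}
-- 	for j, i in enumerate(sub_arr):
-- 		ret[j] = min(i) * sum(i)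
-- 		if ret[j] > max_:
-- 			max_ = ret[j]
-- 			ret_k = i
-- 	return (ret_k, max_)
-- ===== SOURCE B (Python) =====
-- from typing import List
--
-- def max_min_product(arr: List) -> int:
--     # One pass per start index with a running min and running sum: O(n^2)
--     # instead of materialising every subarray and rescanning it (O(n^3)).
--     n = len(arr)
--     max_ = 0
--     bi = br = -1
--     for i in range(n):
--         cur_min = arr[i]
--         cur_sum = 0
--         for r in range(i, n):
--             x = arr[r]
--             if x < cur_min:
--                 cur_min = x
--             cur_sum += x
--             v = cur_min * cur_sum
--             if v > max_:
--                 max_, bi, br = v, i, r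
--     return (arr[bi:br + 1], max_)
-- ===== Notes on version B (the rewrite author's own statement) =====
-- stated objective: faster
-- what changed: B replaces A's materialise-all-subarrays-then-rescan-each (min and sum recomputed per subarray) with a per-start-index sweep that maintains a running min and running sum and tracks the best (start,end) indices, slicing once at the end.
import Mathlib
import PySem

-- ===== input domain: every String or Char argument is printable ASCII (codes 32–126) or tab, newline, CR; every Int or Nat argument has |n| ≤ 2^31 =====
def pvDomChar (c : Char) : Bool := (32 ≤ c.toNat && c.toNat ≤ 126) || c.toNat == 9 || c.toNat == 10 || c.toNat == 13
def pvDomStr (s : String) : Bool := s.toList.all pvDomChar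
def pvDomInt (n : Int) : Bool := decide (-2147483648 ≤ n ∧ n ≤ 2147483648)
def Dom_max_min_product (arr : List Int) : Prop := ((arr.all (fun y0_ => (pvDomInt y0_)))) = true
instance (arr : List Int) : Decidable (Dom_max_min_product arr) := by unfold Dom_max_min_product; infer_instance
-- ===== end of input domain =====

-- B replaces A's materialise-all-subarrays-then-rescan-each pass (min and sum recomputed per
-- subarray) by a per-start-index sweep with a running min and running sum, tracking best indices.

-- ===== PORT A =====
def find_sub_arrays (arr : List Int) : List (List Int) :=
  (PySem.List.pyRange 0 (arr.length : Int) 1).foldl (fun ll i =>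
    (PySem.List.pyRange (i + 1) ((arr.length : Int) + 1) 1).foldl (fun ll r =>
      ll ++ [PySem.List.slice arr (some i) (some r)]) ll) []

-- loop body of A's 'for j, i in enumerate(sub_arr)' (state: ret dict, max_, ret_k as Option)
def pvABody (s : PySem.Dict Int Int × Int × Option (List Int)) (ji : Int × List Int) :
    PySem.Dict Int Int × Int × Option (List Int) :=
  let ret := s.1.insert ji.1 (((PySem.List.min? ji.2 (fun x => x)).getD 0) * ji.2.sum)
  if ret.getD ji.1 0 > s.2.1 then (ret, ret.getD ji.1 0, some ji.2) else (ret, s.2.1, s.2.2)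

def max_min_product (arr : List Int) : List Int × Int :=
  let sub_arr := find_sub_arrays arr
  let st := (PySem.List.enumerate sub_arr 0).foldl pvABody (PySem.Dict.empty, 0, none)
  -- Python raises NameError when ret_k was never assigned; those inputs are outside Pre_
  (st.2.2.getD [], st.2.1)

-- ===== PORT B =====
-- inner loop body of Source B (state: cur_min, cur_sum, max_, bi, br)
def pvBInner (arr : List Int) (i : Int) (t : Int × Int × Int × Int × Int) (r : Int) :
    Int × Int × Int × Int × Int :=
  let x := PySem.List.pyGetD arr r 0
  let curMin := if x < t.1 then x else t.1
  let curSum := t.2.1 + x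
  let v := curMin * curSum
  if v > t.2.2.1 then (curMin, curSum, v, i, r) else (curMin, curSum, t.2.2)

def max_min_product_alt (arr : List Int) : List Int × Int :=
  let n : Int := arr.length
  let st := (PySem.List.pyRange 0 n 1).foldl (fun (s : Int × Int × Int) i =>
    ((PySem.List.pyRange i n 1).foldl (pvBInner arr i) (PySem.List.pyGetD arr i 0, 0, s)).2.2)
    (0, -1, -1)
  (PySem.List.slice arr (some st.2.1) (some (st.2.2 + 1)), st.1)

-- ===== PRECONDITION & SPEC =====
-- Pre_ excludes exactly the inputs where Python A raises NameError: if every element is 0,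
-- every subarray has min*sum = 0, so ret_k is never assigned.
def Pre_max_min_product (arr : List Int) : Prop := (arr.any (fun x => x != 0)) = true
instance (arr : List Int) : Decidable (Pre_max_min_product arr) := by unfold Pre_max_min_product; infer_instance
def pvWitness_max_min_product : List Int := [1]

def Spec_max_min_product (arr : List Int) (out : List Int × Int) : Prop := out = max_min_product_alt arr
instance (arr : List Int) (out : List Int × Int) : Decidable (Spec_max_min_product arr out) := by unfold Spec_max_min_product; infer_instance

-- ===== CLAIM (what is proved, stated in full; the proofs are below) =====
def Claim_equal_max_min_product : Prop := ∀ (arr : List Int), Dom_max_min_product arr → Pre_max_min_product arr → Spec_max_min_product arr (max_min_product arr)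

-- ===== LEMMAS AND PROOFS =====

-- A's loop body with the bookkeeping dict (and the enumerate index) projected away
def pvStepA (s : Int × Option (List Int)) (sub : List Int) : Int × Option (List Int) :=
  let v := ((PySem.List.min? sub (fun x => x)).getD 0) * sub.sum
  if v > s.1 then (v, some sub) else s

-- simulation relation: A's (max_, ret_k) state vs B's (max_, bi, br) state
def pvRel (arr : List Int) (sA : Int × Option (List Int)) (sB : Int × Int × Int) : Prop :=
  sA.1 = sB.1 ∧ sA.2.getD [] = PySem.List.slice arr (some sB.2.1) (some (sB.2.2 + 1))

lemma pvDictFree (l : List (List Int)) : ∀ (j0 : Int) (d : PySem.Dict Int Int)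
    (m : Int) (k : Option (List Int)),
    ((PySem.List.enumerate l j0).foldl pvABody (d, m, k)).2 = l.foldl pvStepA (m, k) := by
  induction l with
  | nil => intro j0 d m k; simp [PySem.List.enumerate]
  | cons x xs ih =>
    intro j0 d m k
    rw [PySem.List.enumerate_cons]
    simp only [List.foldl_cons, pvABody, pvStepA, PySem.Dict.getD_insert_self]
    split_ifs with h
    · exact ih (j0+1) _ _ (some x)
    · exact ih (j0+1) _ m k

lemma pvFsa (arr : List Int) : find_sub_arrays arr =
    (PySem.List.pyRange 0 (arr.length : Int) 1).flatMap (fun i =>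
      (PySem.List.pyRange (i + 1) ((arr.length : Int) + 1) 1).map
        (fun r => PySem.List.slice arr (some i) (some r))) := by
  unfold find_sub_arrays
  simp only [PySem.List.foldl_append_singleton_eq_map]
  rw [PySem.List.foldl_append_eq_flatMap]
  simp

lemma pvSliceInit (arr : List Int) : PySem.List.slice arr (some (-1)) (some 0) = [] := by
  have h := PySem.List.length_slice arr (-1) 0
  have h0 : PySem.List.clampIdx arr.length 0 = 0 := by
    simp
  rw [List.eq_nil_iff_length_eq_zero, h, h0]
  omega

lemma pvIfMin (c x : Int) : (if x < c then x else c) = min c x := by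
  rcases lt_or_ge x c with h | h
  · rw [if_pos h, min_eq_right h.le]
  · rw [if_neg (not_lt.mpr h), min_eq_left h]

lemma pvTakeSucc {α : Type} (l : List α) (k : Nat) (hk : k < l.length) :
    l.take (k+1) = l.take k ++ [l[k]] := by
  rw [List.take_add_one]; simp [List.getElem?_eq_getElem hk]

-- min() of a nonempty slice as the running-min fold started at its first element
lemma pvMinChar (arr : List Int) (i : Int) (hi : 0 ≤ i) (hin : i < (arr.length : Int))
    (k : Nat) :
    ((PySem.List.min? ((arr.drop i.toNat).take (k+1)) (fun x => x)).getD 0)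
      = ((arr.drop i.toNat).take (k+1)).foldl min (PySem.List.pyGetD arr i 0) := by
  have hlt : i.toNat < arr.length := by omega
  have hd : arr.drop i.toNat = arr[i.toNat] :: arr.drop (i.toNat + 1) :=
    List.drop_eq_getElem_cons hlt
  have ha0 : PySem.List.pyGetD arr i 0 = arr[i.toNat] :=
    PySem.List.pyGetD_eq_getElem arr 0 hi hin
  rw [hd, ha0, List.take_succ_cons, PySem.List.min?_id_cons]
  simp [List.foldl_cons]

-- inner-loop simulation: A's scan of the subarrays starting at i vs B's running min/sum sweep
lemma pvInner (arr : List Int) (i : Int) (hi : 0 ≤ i) (hin : i < (arr.length : Int)) :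
    ∀ (m : Nat) (r : Int), i ≤ r → r + m = (arr.length : Int) →
    ∀ (sA : Int × Option (List Int)) (sB : Int × Int × Int), pvRel arr sA sB →
    pvRel arr
      (((PySem.List.pyRange (r+1) ((arr.length : Int)+1) 1).map
          (fun r' => PySem.List.slice arr (some i) (some r'))).foldl pvStepA sA)
      (((PySem.List.pyRange r (arr.length : Int) 1).foldl (pvBInner arr i)
          (((arr.drop i.toNat).take (r - i).toNat).foldl min (PySem.List.pyGetD arr i 0),
           ((arr.drop i.toNat).take (r - i).toNat).sum, sB)).2.2) := by
  intro m
  induction m with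
  | zero =>
    intro r hir hrm sA sB hrel
    have h1 : PySem.List.pyRange (r+1) ((arr.length : Int)+1) 1 = [] :=
      PySem.List.pyRange_one_eq_nil (by omega)
    have h2 : PySem.List.pyRange r (arr.length : Int) 1 = [] :=
      PySem.List.pyRange_one_eq_nil (by omega)
    rw [h1, h2]; simpa using hrel
  | succ m ih =>
    intro r hir hrm sA sB hrel
    have hrn : r < (arr.length : Int) := by omega
    set k : Nat := (r - i).toNat with hk
    set l : List Int := arr.drop i.toNat with hl
    set a0 : Int := PySem.List.pyGetD arr i 0 with ha0
    have hkl : k < l.length := by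
      rw [hl, List.length_drop]; omega
    have hx : PySem.List.pyGetD arr r 0 = l[k] := by
      rw [PySem.List.pyGetD_eq_getElem arr 0 (by omega) (by omega)]
      simp only [hl, List.getElem_drop]
      simp only [show i.toNat + k = r.toNat from by omega]
    have hts : l.take (k+1) = l.take k ++ [l[k]] := pvTakeSucc l k hkl
    have hslice : PySem.List.slice arr (some i) (some (r+1)) = l.take (k+1) := by
      rw [PySem.List.slice_toNat arr hi (by omega), ← hl]
      congr 1; omega
    have h1 : PySem.List.pyRange (r+1) ((arr.length : Int)+1) 1
        = (r+1) :: PySem.List.pyRange (r+1+1) ((arr.length : Int)+1) 1 :=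
      PySem.List.pyRange_one_cons (by omega)
    have h2 : PySem.List.pyRange r (arr.length : Int) 1
        = r :: PySem.List.pyRange (r+1) (arr.length : Int) 1 :=
      PySem.List.pyRange_one_cons (by omega)
    rw [h1, h2, List.map_cons, List.foldl_cons, List.foldl_cons]
    -- one B step
    have hstepB : pvBInner arr i (((l.take k).foldl min a0), (l.take k).sum, sB) r
        = (if ((l.take (k+1)).foldl min a0) * (l.take (k+1)).sum > sB.1
           then ((l.take (k+1)).foldl min a0, (l.take (k+1)).sum,
                 ((l.take (k+1)).foldl min a0) * (l.take (k+1)).sum, i, r)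
           else ((l.take (k+1)).foldl min a0, (l.take (k+1)).sum, sB)) := by
      show (let x := PySem.List.pyGetD arr r 0
            let curMin := if x < (l.take k).foldl min a0 then x else (l.take k).foldl min a0
            let curSum := (l.take k).sum + x
            let v := curMin * curSum
            if v > sB.1 then (curMin, curSum, v, i, r) else (curMin, curSum, sB)) = _
      simp only [hx, pvIfMin, hts, List.foldl_append, List.foldl_cons, List.foldl_nil,
        List.sum_append, List.sum_cons, List.sum_nil, add_zero]
    -- one A step
    have hstepA : pvStepA sA (PySem.List.slice arr (some i) (some (r+1)))
        = if ((l.take (k+1)).foldl min a0) * (l.take (k+1)).sum > sA.1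
          then (((l.take (k+1)).foldl min a0) * (l.take (k+1)).sum, some (l.take (k+1)))
          else sA := by
      show (let v := ((PySem.List.min? (PySem.List.slice arr (some i) (some (r+1))) (fun x => x)).getD 0)
                      * (PySem.List.slice arr (some i) (some (r+1))).sum
            if v > sA.1 then (v, some (PySem.List.slice arr (some i) (some (r+1)))) else sA) = _
      have hmc := pvMinChar arr i hi hin k
      rw [← hl, ← ha0] at hmc
      simp only [hslice, hmc]
    rw [hstepA, hstepB]
    have hknext : ((r+1) - i).toNat = k + 1 := by omega
    have happ := ih (r+1) (by omega) (by omega)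
    rw [hknext] at happ
    rw [hrel.1]
    split_ifs with h
    · exact happ _ _ ⟨rfl, by simpa using hslice.symm⟩
    · exact happ _ _ hrel

lemma pvTake0 (arr : List Int) (i : Int) :
    ((arr.drop i.toNat).take (i - i).toNat).foldl min (PySem.List.pyGetD arr i 0)
      = PySem.List.pyGetD arr i 0 ∧ ((arr.drop i.toNat).take (i - i).toNat).sum = 0 := by
  simp

-- outer-loop simulation: A's fold over all subarrays (grouped by start index) vs B's outer loop
lemma pvOuter (arr : List Int) :
    ∀ (m : Nat) (i : Int), 0 ≤ i → i + m = (arr.length : Int) →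
    ∀ (sA : Int × Option (List Int)) (sB : Int × Int × Int), pvRel arr sA sB →
    pvRel arr
      (((PySem.List.pyRange i (arr.length : Int) 1).flatMap (fun i' =>
          (PySem.List.pyRange (i'+1) ((arr.length : Int)+1) 1).map
            (fun r => PySem.List.slice arr (some i') (some r)))).foldl pvStepA sA)
      ((PySem.List.pyRange i (arr.length : Int) 1).foldl
          (fun (s : Int × Int × Int) i' =>
            ((PySem.List.pyRange i' (arr.length : Int) 1).foldl (pvBInner arr i')
              (PySem.List.pyGetD arr i' 0, 0, s)).2.2) sB) := by
  intro m
  induction m with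
  | zero =>
    intro i hi him sA sB hrel
    rw [PySem.List.pyRange_one_eq_nil (by omega)]
    simpa using hrel
  | succ m ih =>
    intro i hi him sA sB hrel
    have hin : i < (arr.length : Int) := by omega
    rw [PySem.List.pyRange_one_cons hin, List.flatMap_cons, List.foldl_append,
      List.foldl_cons]
    have hstep := pvInner arr i hi hin (m+1) i (le_refl i) (by omega) sA sB hrel
    rw [(pvTake0 arr i).1, (pvTake0 arr i).2] at hstep
    exact ih (i+1) (by omega) (by omega) _ _ hstep

-- ===== VERDICT (by name: the statement is the Claim_ definition above) =====
theorem max_min_product_spec : Claim_equal_max_min_product := by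
  unfold Claim_equal_max_min_product
  intro arr _ _
  unfold Spec_max_min_product max_min_product max_min_product_alt
  simp only []
  rw [pvDictFree, pvFsa]
  have hrel0 : pvRel arr ((0 : Int), (none : Option (List Int))) ((0 : Int), (-1 : Int), (-1 : Int)) := by
    refine ⟨rfl, ?_⟩
    show (none : Option (List Int)).getD [] = _
    norm_num [pvSliceInit]
  have h := pvOuter arr arr.length 0 (by omega) (by simp) _ _ hrel0
  exact Prod.ext_iff.mpr ⟨h.2, h.1⟩
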